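-- pv_equiv track=rewrite | github.com/craftor-3622/Coding_test | 4014_airstrip.py | is_inline
-- ===== SOURCE A (Python) =====
-- def is_inline(cliff_line: list, ramp_length: int):
--     for idx in range(len(cliff_line)):
--         # 경사로가 너무 왼쪽에 있으면 안됩니다.
--         if (cliff_line[idx] >= 1
--             and idx < ramp_length - 1):
--             return False
--         # 경사로가 너무 오른쪽에 있어서도 안됩니다.
--         elif (cliff_line[idx] <= -1
--               and idx >= len(cliff_line) - (ramp_length - 1)):
--             return False
--
--     # 이상 없습니다.
--     else:
--         return True
-- ===== SOURCE B (Python) =====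
-- def is_inline(cliff_line: list, ramp_length: int):
--     # One full pass accumulating two extremal positions, no early exit:
--     # the first index holding a value >= 1 and the last index holding a value <= -1.
--     first_high = None
--     last_low = None
--     for i, v in enumerate(cliff_line):
--         if v >= 1 and first_high is None:
--             first_high = i
--         if v <= -1:
--             last_low = i
--     n = len(cliff_line)
--     k = ramp_length - 1
--     if first_high is not None and first_high < k:
--         return False
--     if last_low is not None and last_low >= n - k:
--         return False
--     return True
-- ===== Notes on version B (the rewrite author's own statement) =====
-- stated objective: alternative
-- what changed: A interleaves both checks in one loop with early returns at the first offending index; B makes one full accumulator pass that computes two extremal positions (first index with value >= 1, last index with value <= -1) and then decides validity by comparing those two positions against the ramp-length thresholds.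
import Mathlib
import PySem

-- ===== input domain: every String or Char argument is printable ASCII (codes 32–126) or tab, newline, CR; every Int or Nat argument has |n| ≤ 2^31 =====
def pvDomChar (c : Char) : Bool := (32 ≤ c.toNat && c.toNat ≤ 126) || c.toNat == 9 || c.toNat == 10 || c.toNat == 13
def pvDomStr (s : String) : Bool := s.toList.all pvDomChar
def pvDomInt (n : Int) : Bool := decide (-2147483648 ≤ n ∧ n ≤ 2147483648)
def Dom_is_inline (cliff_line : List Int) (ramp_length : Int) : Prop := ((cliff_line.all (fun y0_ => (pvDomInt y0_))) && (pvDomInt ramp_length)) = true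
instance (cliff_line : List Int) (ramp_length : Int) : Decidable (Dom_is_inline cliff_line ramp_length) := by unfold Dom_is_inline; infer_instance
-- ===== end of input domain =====

-- B replaces A's early-returning interleaved loop with one full accumulator pass computing
-- two extremal positions (first index ≥ 1, last index ≤ -1) then two threshold comparisons;
-- objective: alternative decomposition, same cost.

-- ===== PORT A =====
-- 'for idx in range(len(cliff_line))' reading cliff_line[idx]: walked as structural
-- recursion over the list carrying the absolute index idx (exact: idx covers 0..n-1
-- and each cliff_line[idx] is the head of the remaining suffix).
def is_inline_go (n r : Int) : Int → List Int → Bool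
  | _, [] => true
  | idx, v :: rest =>
    if v ≥ 1 ∧ idx < r - 1 then false
    else if v ≤ -1 ∧ idx ≥ n - (r - 1) then false
    else is_inline_go n r (idx + 1) rest

def is_inline (cliff_line : List Int) (ramp_length : Int) : Bool :=
  is_inline_go (cliff_line.length : Int) ramp_length 0 cliff_line

-- ===== PORT B =====
-- Source B's 'for i, v in enumerate(...)' accumulator loop: structural recursion carrying
-- the index i and the two Optional accumulators, exactly as the Python updates them.
def is_inline_alt_scan : Int → Option Int → Option Int → List Int → Option Int × Option Int
  | _, fh, ll, [] => (fh, ll)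
  | i, fh, ll, v :: rest =>
    is_inline_alt_scan (i + 1)
      (if v ≥ 1 ∧ fh = none then some i else fh)
      (if v ≤ -1 then some i else ll)
      rest

def is_inline_alt (cliff_line : List Int) (ramp_length : Int) : Bool :=
  let s := is_inline_alt_scan 0 none none cliff_line
  let n : Int := cliff_line.length
  let k : Int := ramp_length - 1
  if (match s.1 with | some p => decide (p < k) | none => false) then false
  else if (match s.2 with | some q => decide (q ≥ n - k) | none => false) then false
  else true

-- ===== PRECONDITION & SPEC =====
def Spec_is_inline (cliff_line : List Int) (ramp_length : Int) (out : Bool) : Prop := out = is_inline_alt cliff_line ramp_length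
instance (cliff_line : List Int) (ramp_length : Int) (out : Bool) : Decidable (Spec_is_inline cliff_line ramp_length out) := by unfold Spec_is_inline; infer_instance

-- ===== CLAIM (what is proved, stated in full; the proofs are below) =====
def Claim_equal_is_inline : Prop := ∀ (cliff_line : List Int) (ramp_length : Int), Dom_is_inline cliff_line ramp_length → Spec_is_inline cliff_line ramp_length (is_inline cliff_line ramp_length)

-- ===== LEMMAS AND PROOFS =====

-- A "bad index": some position violates the ramp constraints.
def Bad (c : List Int) (r : Int) : Prop :=
  ∃ j : Nat, j < c.length ∧
    ((c.getD j 0 ≥ 1 ∧ (j : Int) < r - 1) ∨ (c.getD j 0 ≤ -1 ∧ (j : Int) ≥ (c.length : Int) - (r - 1)))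

lemma go_false_iff (rest : List Int) (n r : Int) : ∀ (idx : Int),
    (is_inline_go n r idx rest = false ↔
      ∃ j : Nat, j < rest.length ∧
        ((rest.getD j 0 ≥ 1 ∧ idx + (j : Int) < r - 1) ∨ (rest.getD j 0 ≤ -1 ∧ idx + (j : Int) ≥ n - (r - 1)))) := by
  induction rest with
  | nil => intro idx; simp [is_inline_go]
  | cons v tail ih =>
    intro idx
    simp only [is_inline_go]
    split_ifs with h1 h2
    · constructor
      · intro _; exact ⟨0, by simp, Or.inl ⟨h1.1, by simpa using h1.2⟩⟩
      · intro _; rfl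
    · constructor
      · intro _; exact ⟨0, by simp, Or.inr ⟨h2.1, by simpa using h2.2⟩⟩
      · intro _; rfl
    · rw [ih (idx + 1)]
      constructor
      · rintro ⟨j, hj, hc⟩
        refine ⟨j + 1, by simpa using hj, ?_⟩
        simpa [add_assoc, add_comm, add_left_comm] using hc
      · rintro ⟨j, hj, hc⟩
        cases j with
        | zero =>
          exfalso
          simp at hc
          rcases hc with ⟨hv, hi⟩ | ⟨hv, hi⟩
          · exact h1 ⟨hv, by omega⟩
          · exact h2 ⟨hv, by omega⟩
        | succ j' =>
          refine ⟨j', by simpa using hj, ?_⟩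
          simpa [add_assoc, add_comm, add_left_comm] using hc

lemma a_false_iff (c : List Int) (r : Int) : is_inline c r = false ↔ Bad c r := by
  unfold is_inline Bad
  rw [go_false_iff]
  simp

-- Pure (accumulator-free) descriptions of the two components of the scan.
def firstHighF : Int → List Int → Option Int
  | _, [] => none
  | i, v :: rest => if v ≥ 1 then some i else firstHighF (i + 1) rest

def lastLowF : Int → List Int → Option Int
  | _, [] => none
  | i, v :: rest =>
    match lastLowF (i + 1) rest with
    | some q => some q
    | none => if v ≤ -1 then some i else none

lemma scan_eq (rest : List Int) : ∀ (i : Int) (fh ll : Option Int),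
    is_inline_alt_scan i fh ll rest =
      ((match fh with | some p => some p | none => firstHighF i rest),
       (match lastLowF i rest with | some q => some q | none => ll)) := by
  induction rest with
  | nil => intro i fh ll; cases fh <;> simp [is_inline_alt_scan, firstHighF, lastLowF]
  | cons v tail ih =>
    intro i fh ll
    simp only [is_inline_alt_scan, ih, Prod.mk.injEq]
    refine ⟨?_, ?_⟩
    · cases fh with
      | some p => simp
      | none => simp only [firstHighF]; split_ifs <;> simp_all
    · simp only [lastLowF]
      cases h : lastLowF (i + 1) tail <;> split_ifs <;> simp_all

-- each returned position carries a witness index/value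
lemma firstHighF_mem (rest : List Int) : ∀ (i p : Int), firstHighF i rest = some p →
    ∃ j : Nat, j < rest.length ∧ rest.getD j 0 ≥ 1 ∧ p = i + (j : Int) := by
  induction rest with
  | nil => intro i p h; simp [firstHighF] at h
  | cons v tail ih =>
    intro i p h
    by_cases hv : v ≥ 1
    · simp [firstHighF, hv] at h
      exact ⟨0, by simp, by simpa using hv, by omega⟩
    · simp [firstHighF, hv] at h
      obtain ⟨j, hj, hval, hp⟩ := ih (i + 1) p h
      exact ⟨j + 1, by simpa using hj, by simpa using hval, by push_cast; omega⟩

lemma firstHighF_le (rest : List Int) : ∀ (i : Int) (j : Nat), j < rest.length →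
    rest.getD j 0 ≥ 1 → ∃ p, firstHighF i rest = some p ∧ p ≤ i + (j : Int) := by
  induction rest with
  | nil => intro i j hj _; simp at hj
  | cons v tail ih =>
    intro i j hj hval
    by_cases hv : v ≥ 1
    · exact ⟨i, by simp [firstHighF, hv], by omega⟩
    · cases j with
      | zero => simp at hval; omega
      | succ j' =>
        obtain ⟨p, hp, hle⟩ := ih (i + 1) j' (by simpa using hj) (by simpa using hval)
        exact ⟨p, by simp [firstHighF, hv, hp], by push_cast at hle ⊢; omega⟩

lemma lastLowF_mem (rest : List Int) : ∀ (i q : Int), lastLowF i rest = some q →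
    ∃ j : Nat, j < rest.length ∧ rest.getD j 0 ≤ -1 ∧ q = i + (j : Int) := by
  induction rest with
  | nil => intro i q h; simp [lastLowF] at h
  | cons v tail ih =>
    intro i q h
    simp only [lastLowF] at h
    cases htl : lastLowF (i + 1) tail with
    | some q' =>
      rw [htl] at h
      simp at h
      obtain ⟨j, hj, hval, hq⟩ := ih (i + 1) q' htl
      exact ⟨j + 1, by simpa using hj, by simpa using hval, by push_cast; omega⟩
    | none =>
      rw [htl] at h
      by_cases hv : v ≤ -1
      · simp [hv] at h
        exact ⟨0, by simp, by simpa using hv, by omega⟩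
      · simp [hv] at h

lemma lastLowF_ge (rest : List Int) : ∀ (i : Int) (j : Nat), j < rest.length →
    rest.getD j 0 ≤ -1 → ∃ q, lastLowF i rest = some q ∧ q ≥ i + (j : Int) := by
  induction rest with
  | nil => intro i j hj _; simp at hj
  | cons v tail ih =>
    intro i j hj hval
    cases j with
    | zero =>
      simp at hval
      cases htl : lastLowF (i + 1) tail with
      | some q' =>
        obtain ⟨j', hj', hv', hq'⟩ := lastLowF_mem tail (i + 1) q' htl
        exact ⟨q', by simp [lastLowF, htl], by omega⟩
      | none => exact ⟨i, by simp [lastLowF, htl, hval], by omega⟩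
    | succ j' =>
      obtain ⟨q, hq, hge⟩ := ih (i + 1) j' (by simpa using hj) (by simpa using hval)
      exact ⟨q, by simp [lastLowF, hq], by push_cast at hge ⊢; omega⟩

lemma b_false_iff (c : List Int) (r : Int) : is_inline_alt c r = false ↔ Bad c r := by
  unfold is_inline_alt
  rw [scan_eq]
  simp only []
  split_ifs with h1 h2
  · -- left check fired: firstHighF 0 c = some p with p < r - 1
    cases hfh : firstHighF 0 c with
    | none => rw [hfh] at h1; exact absurd h1 (by simp)
    | some p =>
      rw [hfh] at h1
      simp at h1
      obtain ⟨j, hj, hval, hp⟩ := firstHighF_mem c 0 p hfh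
      exact iff_of_true rfl ⟨j, hj, Or.inl ⟨hval, by omega⟩⟩
  · -- right check fired
    cases hll : lastLowF 0 c with
    | none => rw [hll] at h2; exact absurd h2 (by simp)
    | some q =>
      rw [hll] at h2
      simp at h2
      obtain ⟨j, hj, hval, hq⟩ := lastLowF_mem c 0 q hll
      exact iff_of_true rfl ⟨j, hj, Or.inr ⟨hval, by omega⟩⟩
  · refine iff_of_false (by simp) ?_
    rintro ⟨j, hj, ⟨hval, hi⟩ | ⟨hval, hi⟩⟩
    · obtain ⟨p, hp, hle⟩ := firstHighF_le c 0 j hj hval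
      rw [hp] at h1
      exact h1 (by simp only [decide_eq_true_eq]; omega)
    · obtain ⟨q, hq, hge⟩ := lastLowF_ge c 0 j hj hval
      rw [hq] at h2
      exact h2 (by simp only [decide_eq_true_eq]; omega)

-- ===== VERDICT (by name: the statement is the Claim_ definition above) =====
theorem is_inline_spec : Claim_equal_is_inline := by
  intro c r _
  unfold Spec_is_inline
  by_cases hb : Bad c r
  · rw [(a_false_iff c r).mpr hb, (b_false_iff c r).mpr hb]
  · cases ha : is_inline c r with
    | false => exact absurd ((a_false_iff c r).mp ha) hb
    | true =>
      cases hbv : is_inline_alt c r with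
      | false => exact absurd ((b_false_iff c r).mp hbv) hb
      | true => rfl
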